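-- pv_equiv track=rewrite | github.com/tekolhp/liga1-draft | scripts/download_and_compress.py | sanitize_name
-- ===== SOURCE A (Python) =====
-- def sanitize_name(raw: str) -> str:
--     pieces = []
--     for char in raw.lower():
--         if char.isalnum():
--             pieces.append(char)
--         elif pieces and pieces[-1] != "-":
--             pieces.append("-")
--     sanitized = "".join(pieces).strip("-")
--     return sanitized or "image"
-- ===== SOURCE B (Python) =====
-- def sanitize_name(raw: str) -> str:
--     s = raw.lower()
--     frags = []
--     i = 0
--     n = len(s)
--     while i < n:
--         j = i
--         while j < n and s[j].isalnum() == s[i].isalnum():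
--             j += 1
--         frags.append(s[i:j] if s[i].isalnum() else "-")
--         i = j
--     out = "".join(frags).strip("-")
--     return out or "image"
-- ===== Notes on version B (the rewrite author's own statement) =====
-- stated objective: alternative
-- what changed: Replaces A's per-character loop that inspects the last appended piece with a run-based traversal: maximal runs of same-classed characters are located with an inner scan, each alnum run is copied whole and each non-alnum run collapses to one '-', then strip('-') and the 'image' fallback as before.
import Mathlib
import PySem

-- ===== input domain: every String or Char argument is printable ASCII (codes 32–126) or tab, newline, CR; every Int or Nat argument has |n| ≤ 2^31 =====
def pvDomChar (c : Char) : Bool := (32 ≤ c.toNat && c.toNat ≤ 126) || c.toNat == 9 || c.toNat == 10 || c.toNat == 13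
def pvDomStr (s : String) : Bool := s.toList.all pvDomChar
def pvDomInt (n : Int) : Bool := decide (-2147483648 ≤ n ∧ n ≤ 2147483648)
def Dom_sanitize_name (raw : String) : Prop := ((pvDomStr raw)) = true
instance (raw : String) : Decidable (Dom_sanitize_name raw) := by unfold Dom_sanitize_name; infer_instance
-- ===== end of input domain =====

-- B replaces A's per-character loop (which inspects the last appended piece) with a
-- run-based traversal over maximal same-classed runs; same cost, alternative structure.

-- ===== PORT A =====
-- per-character loop: append alnum chars; append '-' when pieces nonempty and last ≠ '-'
def sanitize_name (raw : String) : String :=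
  let pieces : List Char := (PySem.Str.lower raw).toList.foldl
    (fun pieces c =>
      if PySem.Chars.isalnum c then pieces ++ [c]
      else if pieces ≠ [] ∧ pieces.getLast? ≠ some '-' then pieces ++ ['-']
      else pieces) []
  -- "".join(pieces).strip("-"); pieces holds single characters, so join = the char list
  let sanitized := PySem.Chars.stripChars pieces ['-']
  if sanitized = [] then "image" else String.ofList sanitized

-- ===== PORT B =====
-- one step per maximal run: the inner while-scan of Source B locates the end of the run of
-- characters with the same isalnum class as the head (takeWhile/dropWhile = that scan)
def sanitize_name_runs : List Char → List Char
  | [] => []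
  | c :: rest =>
    let k := PySem.Chars.isalnum c
    let run := rest.takeWhile (fun x => PySem.Chars.isalnum x == k)
    let rest' := rest.dropWhile (fun x => PySem.Chars.isalnum x == k)
    (if k then c :: run else ['-']) ++ sanitize_name_runs rest'
termination_by cs => cs.length
decreasing_by
  simp only [List.length_cons]
  exact Nat.lt_succ_of_le (List.length_dropWhile_le _ _)

def sanitize_name_alt (raw : String) : String :=
  let out := PySem.Chars.stripChars (sanitize_name_runs (PySem.Str.lower raw).toList) ['-']
  if out = [] then "image" else String.ofList out

-- ===== PRECONDITION & SPEC =====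
def Spec_sanitize_name (raw : String) (out : String) : Prop := out = sanitize_name_alt raw
instance (raw : String) (out : String) : Decidable (Spec_sanitize_name raw out) := by unfold Spec_sanitize_name; infer_instance

-- ===== CLAIM (what is proved, stated in full; the proofs are below) =====
def Claim_equal_sanitize_name : Prop := ∀ (raw : String), Dom_sanitize_name raw → Spec_sanitize_name raw (sanitize_name raw)

-- ===== LEMMAS AND PROOFS =====

-- A's loop, summarised: b says whether a separator may be emitted (pieces nonempty, last ≠ '-')
def loopA : List Char → Bool → List Char
  | [], _ => []
  | c :: cs, b =>
    if PySem.Chars.isalnum c then c :: loopA cs true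
    else if b then '-' :: loopA cs false
    else loopA cs b

theorem alnum_ne_dash {c : Char} (h : PySem.Chars.isalnum c = true) : c ≠ '-' := by
  intro he; subst he
  exact absurd h (by decide)

-- unfolding lemmas for B's run recursion at a cons
theorem runs_cons_alnum (c : Char) (rest : List Char) (h : PySem.Chars.isalnum c = true) :
    sanitize_name_runs (c :: rest) = c :: rest.takeWhile PySem.Chars.isalnum
      ++ sanitize_name_runs (rest.dropWhile PySem.Chars.isalnum) := by
  rw [sanitize_name_runs]; simp [h]

theorem runs_cons_other (c : Char) (rest : List Char) (h : ¬ PySem.Chars.isalnum c = true) :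
    sanitize_name_runs (c :: rest)
      = '-' :: sanitize_name_runs (rest.dropWhile (fun x => !PySem.Chars.isalnum x)) := by
  rw [sanitize_name_runs]; simp [h]

-- A's fold equals loopA, given the Bool summary of the accumulator
theorem foldA_eq (cs : List Char) : ∀ (pieces : List Char) (b : Bool),
    ((pieces ≠ [] ∧ pieces.getLast? ≠ some '-') ↔ b = true) →
    cs.foldl (fun pieces c =>
      if PySem.Chars.isalnum c then pieces ++ [c]
      else if pieces ≠ [] ∧ pieces.getLast? ≠ some '-' then pieces ++ ['-']
      else pieces) pieces = pieces ++ loopA cs b := by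
  induction cs with
  | nil => intro pieces b _; simp [loopA]
  | cons c cs ih =>
    intro pieces b hb
    by_cases hal : PySem.Chars.isalnum c = true
    · simp only [List.foldl_cons, if_pos hal]
      rw [ih (pieces ++ [c]) true (by simp [List.getLast?_append, alnum_ne_dash hal])]
      simp [loopA, hal]
    · by_cases hcond : pieces ≠ [] ∧ pieces.getLast? ≠ some '-'
      · have hbt : b = true := hb.mp hcond
        simp only [List.foldl_cons]
        rw [if_neg hal, if_pos hcond, ih (pieces ++ ['-']) false (by simp [List.getLast?_append])]
        simp [loopA, hal, hbt]
      · have hbf : b = false := by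
          cases b with
          | false => rfl
          | true => exact absurd (hb.mpr rfl) hcond
        simp only [List.foldl_cons]
        rw [if_neg hal, if_neg hcond, ih pieces b hb]
        simp [loopA, hal, hbf]

-- loopA in the armed state copies the alnum prefix
theorem loopA_true_split (cs : List Char) :
    loopA cs true = cs.takeWhile PySem.Chars.isalnum
      ++ loopA (cs.dropWhile PySem.Chars.isalnum) true := by
  induction cs with
  | nil => simp [loopA]
  | cons c cs ih =>
    by_cases hal : PySem.Chars.isalnum c = true
    · simp [loopA, hal, ih]
    · simp [loopA, hal]

-- loopA in the disarmed state skips the non-alnum prefix, then behaves armed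
theorem loopA_false_skip (cs : List Char) :
    loopA cs false = loopA (cs.dropWhile (fun x => !PySem.Chars.isalnum x)) true := by
  induction cs with
  | nil => simp [loopA]
  | cons c cs ih =>
    by_cases hal : PySem.Chars.isalnum c = true
    · simp [loopA, hal]
    · simp [loopA, hal, ih]

-- armed loopA = B's run recursion
theorem loopA_true_eq_runs (cs : List Char) : loopA cs true = sanitize_name_runs cs := by
  induction hn : cs.length using Nat.strong_induction_on generalizing cs with
  | _ n ih =>
  cases cs with
  | nil => simp [loopA, sanitize_name_runs]
  | cons c rest =>
    subst hn
    by_cases hal : PySem.Chars.isalnum c = true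
    · rw [runs_cons_alnum c rest hal,
        show loopA (c :: rest) true = c :: loopA rest true from by simp [loopA, hal],
        loopA_true_split rest,
        ih (rest.dropWhile PySem.Chars.isalnum).length
          (Nat.lt_succ_of_le (List.length_dropWhile_le _ _)) _ rfl]
      simp
    · rw [runs_cons_other c rest hal,
        show loopA (c :: rest) true = '-' :: loopA rest false from by simp [loopA, hal],
        loopA_false_skip rest,
        ih (rest.dropWhile (fun x => !PySem.Chars.isalnum x)).length
          (Nat.lt_succ_of_le (List.length_dropWhile_le _ _)) _ rfl]

-- stripping '-' erases the difference between the two start states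
theorem strip_loopA_false_eq (cs : List Char) :
    PySem.Chars.stripChars (loopA cs false) ['-']
      = PySem.Chars.stripChars (sanitize_name_runs cs) ['-'] := by
  cases cs with
  | nil => simp [loopA, sanitize_name_runs]
  | cons c rest =>
    by_cases hal : PySem.Chars.isalnum c = true
    · rw [show loopA (c :: rest) false = loopA (c :: rest) true from by simp [loopA, hal],
        loopA_true_eq_runs]
    · rw [show loopA (c :: rest) false = loopA rest false from by simp [loopA, hal],
        loopA_false_skip rest, loopA_true_eq_runs, runs_cons_other c rest hal]
      simp [PySem.Chars.stripChars]

-- ===== VERDICT (by name: the statement is the Claim_ definition above) =====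
theorem sanitize_name_spec : Claim_equal_sanitize_name := by
  intro raw _
  unfold Spec_sanitize_name sanitize_name sanitize_name_alt
  rw [foldA_eq _ [] false (by simp)]
  simp only [List.nil_append]
  rw [strip_loopA_false_eq]
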